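-- pv_equiv track=rewrite | github.com/chaitanyakumarcodes/ai-data-analyst-app | app/services/dashboard_presenter.py | ordered_plots
-- ===== SOURCE A (Python) =====
-- _PLOT_ORDER = (
--     "target_dist",
--     "feature_importance",
--     "corr_heatmap",
-- )
--
-- _PLOT_TITLES = {
--     "target_dist": "Target distribution",
--     "feature_importance": "Feature importance",
--     "corr_heatmap": "Correlation heatmap",
-- }
--
-- def ordered_plots(plot_paths: dict[str, str]) -> list[dict[str, str]]:
--     """Stable order and human titles for charts."""
--     out: list[dict[str, str]] = []
--     used: set[str] = set()
--     for key in _PLOT_ORDER: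
--         if key in plot_paths:
--             used.add(key)
--             out.append(
--                 {
--                     "key": key,
--                     "title": _PLOT_TITLES.get(key, key.replace("_", " ").title()),
--                     "src": plot_paths[key],
--                 }
--             )
--     for key, src in plot_paths.items():
--         if key in used:
--             continue
--         out.append(
--             {
--                 "key": key,
--                 "title": key.replace("_", " ").title(),
--                 "src": src,
--             }
--         )
--     return out
-- ===== SOURCE B (Python) =====
-- _PLOT_ORDER = (
--     "target_dist",
--     "feature_importance",
--     "corr_heatmap",
-- )
--
-- _PLOT_TITLES = {
--     "target_dist": "Target distribution",
--     "feature_importance": "Feature importance",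
--     "corr_heatmap": "Correlation heatmap",
-- }
--
-- def ordered_plots(plot_paths: dict[str, str]) -> list[dict[str, str]]:
--     """Stable order and human titles for charts."""
--     def rank(item):
--         key = item[0]
--         return _PLOT_ORDER.index(key) if key in _PLOT_ORDER else len(_PLOT_ORDER)
--     return [
--         {
--             "key": key,
--             "title": _PLOT_TITLES.get(key, key.replace("_", " ").title()),
--             "src": src,
--         }
--         for key, src in sorted(plot_paths.items(), key=rank)
--     ]
-- ===== Notes on version B (the rewrite author's own statement) =====
-- stated objective: simpler
-- what changed: Replaces A's two-phase construction (a pass over _PLOT_ORDER collecting present keys plus a second pass over the dict for the leftovers, with a 'used' set) by a single stable sort of the dict items under a rank key (_PLOT_ORDER.index with a sentinel for unknown keys) followed by one map; stability keeps non-ordered keys in insertion order.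
import Mathlib
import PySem

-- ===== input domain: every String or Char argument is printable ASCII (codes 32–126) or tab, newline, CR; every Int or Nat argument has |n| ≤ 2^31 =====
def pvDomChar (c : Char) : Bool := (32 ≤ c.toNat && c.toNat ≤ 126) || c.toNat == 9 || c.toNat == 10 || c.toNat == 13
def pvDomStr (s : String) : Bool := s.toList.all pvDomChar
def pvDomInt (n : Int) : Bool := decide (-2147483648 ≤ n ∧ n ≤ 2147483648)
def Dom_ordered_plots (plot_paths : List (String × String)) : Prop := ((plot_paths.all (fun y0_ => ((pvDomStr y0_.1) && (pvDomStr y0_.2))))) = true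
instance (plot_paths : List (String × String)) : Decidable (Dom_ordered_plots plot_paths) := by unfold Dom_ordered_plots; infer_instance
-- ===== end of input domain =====

-- B replaces A's two-phase construction (ordered-keys pass then a leftovers pass with a 'used' set)
-- by one stable sort of the dict items under a rank key with a sentinel for unknown keys (objective: simpler).


-- ===== PORT A =====
-- module constants _PLOT_ORDER and _PLOT_TITLES


def pvPlotOrder : List String := ["target_dist", "feature_importance", "corr_heatmap"]

def pvPlotTitles : PySem.Dict String String :=
  PySem.Dict.ofList
    [("target_dist", "Target distribution"),
     ("feature_importance", "Feature importance"),
     ("corr_heatmap", "Correlation heatmap")]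

-- str.title() ported by hand (a letter is uppercased when the previous character is not a
-- letter, lowercased otherwise; non-letters pass through; exact on the ASCII domain)

def pvTitleChars : List Char → Bool → List Char
  | [], _ => []
  | c :: cs, prevAlpha =>
    (if PySem.Chars.isalpha c then
       (if prevAlpha then PySem.Chars.lowerChar c else PySem.Chars.upperChar c)
     else c) :: pvTitleChars cs (PySem.Chars.isalpha c)

-- key.replace("_", " ").title()

def pvFallbackTitle (key : String) : String :=
  String.ofList (pvTitleChars (PySem.Str.replace key "_" " ").toList false)

def ordered_plots (plot_paths : List (String × String)) : List (List (String × String)) :=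
  let d := PySem.Dict.ofList plot_paths
  let st := pvPlotOrder.foldl
    (fun (st : List (List (String × String)) × PySem.Set String) key =>
      if d.contains key then
        (st.1 ++ [[("key", key),
                   ("title", pvPlotTitles.getD key (pvFallbackTitle key)),
                   ("src", d.getD key "")]],
         PySem.Set.add st.2 key)
      else st)
    ([], PySem.Set.empty)
  d.items.foldl
    (fun out kv =>
      if kv.1 ∈ st.2 then out
      else out ++ [[("key", kv.1),
                    ("title", pvFallbackTitle kv.1),
                    ("src", kv.2)]])
    st.1

-- ===== PORT B =====
-- rank(item): _PLOT_ORDER.index(key) if key in _PLOT_ORDER else len(_PLOT_ORDER)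

def pvRank (kv : String × String) : Nat :=
  if kv.1 ∈ pvPlotOrder then (PySem.List.index? pvPlotOrder kv.1).getD 0 else pvPlotOrder.length

def ordered_plots_alt (plot_paths : List (String × String)) : List (List (String × String)) :=
  let d := PySem.Dict.ofList plot_paths
  (PySem.List.sorted d.items pvRank false).map
    (fun kv =>
      [("key", kv.1),
       ("title", pvPlotTitles.getD kv.1 (pvFallbackTitle kv.1)),
       ("src", kv.2)])

-- ===== PRECONDITION & SPEC =====
def Spec_ordered_plots (plot_paths : List (String × String)) (out : List (List (String × String))) : Prop := out = ordered_plots_alt plot_paths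
instance (plot_paths : List (String × String)) (out : List (List (String × String))) : Decidable (Spec_ordered_plots plot_paths out) := by unfold Spec_ordered_plots; infer_instance

-- ===== CLAIM (what is proved, stated in full; the proofs are below) =====
def Claim_equal_ordered_plots : Prop := ∀ (plot_paths : List (String × String)), Dom_ordered_plots plot_paths → Spec_ordered_plots plot_paths (ordered_plots plot_paths)

-- ===== LEMMAS AND PROOFS =====

lemma pvRank_cases (a : String × String) : pvRank a = if a.1 = "target_dist" then 0 else if a.1 = "feature_importance" then 1 else if a.1 = "corr_heatmap" then 2 else 3 := by
  simp only [pvRank, pvPlotOrder, PySem.List.index?]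
  split_ifs <;> simp_all <;> decide

lemma pvRank_le (a : String × String) : pvRank a ≤ 3 := by
  rw [pvRank_cases]; split_ifs <;> omega

lemma insertBy_split {α : Type} (before : α → α → Bool) (x : α) (L R : List α)
    (hL : ∀ y ∈ L, before x y = false) (hR : ∀ y ∈ R, before x y = true) :
    PySem.List.insertBy before x (L ++ R) = L ++ x :: R := by
  induction L with
  | nil =>
    cases R with
    | nil => rfl
    | cons y ys =>
      show PySem.List.insertBy before x (y :: ys) = x :: y :: ys
      rw [show PySem.List.insertBy before x (y :: ys) = if before x y then x :: y :: ys else y :: PySem.List.insertBy before x ys from rfl, hR y (by simp)]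
      simp
  | cons a L ih =>
    have ha := hL a (by simp)
    show PySem.List.insertBy before x (a :: (L ++ R)) = a :: (L ++ x :: R)
    rw [show PySem.List.insertBy before x (a :: (L ++ R)) = if before x a then x :: a :: (L ++ R) else a :: PySem.List.insertBy before x (L ++ R) from rfl, ha]
    simp [ih (fun y hy => hL y (by simp [hy]))]

def pvBucket (xs : List (String × String)) (i : Nat) : List (String × String) :=
  xs.filter (fun a => pvRank a == i)

lemma sorted_rank_buckets (xs : List (String × String)) :
    PySem.List.sorted xs pvRank false =
      pvBucket xs 0 ++ pvBucket xs 1 ++ pvBucket xs 2 ++ pvBucket xs 3 := by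
  rw [PySem.List.sorted_eq_foldl_insertBy]
  induction xs using List.reverseRecOn with
  | nil => rfl
  | append_singleton xs x ih =>
    rw [List.foldl_append, List.foldl_cons, List.foldl_nil, ih]
    have hb : ∀ i y, y ∈ pvBucket xs i → pvRank y = i := by
      intro i y hy
      simp [pvBucket, List.mem_filter] at hy
      exact hy.2
    have key : ∀ i : Nat, pvRank x = i → i ≤ 3 →
        PySem.List.insertBy (fun a b => decide (pvRank a < pvRank b)) x
          (pvBucket xs 0 ++ pvBucket xs 1 ++ pvBucket xs 2 ++ pvBucket xs 3) =
        pvBucket (xs ++ [x]) 0 ++ pvBucket (xs ++ [x]) 1 ++ pvBucket (xs ++ [x]) 2 ++ pvBucket (xs ++ [x]) 3 := by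
      intro i hi hile
      have hbnew : ∀ j : Nat, pvBucket (xs ++ [x]) j = pvBucket xs j ++ (if i = j then [x] else []) := by
        intro j
        simp only [pvBucket, List.filter_append, List.filter_cons, List.filter_nil]
        by_cases h : i = j <;> simp [h, hi]
      interval_cases i
      · rw [show pvBucket xs 0 ++ pvBucket xs 1 ++ pvBucket xs 2 ++ pvBucket xs 3 = pvBucket xs 0 ++ (pvBucket xs 1 ++ pvBucket xs 2 ++ pvBucket xs 3) by simp,
           insertBy_split _ _ _ _ (by intro y hy; have := hb 0 y hy; simp [hi, this]) (by intro y hy; simp only [List.mem_append] at hy; rcases hy with (h|h)|h <;> have := hb _ y h <;> simp [hi, this] <;> omega)]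
        simp [hbnew]
      · rw [show pvBucket xs 0 ++ pvBucket xs 1 ++ pvBucket xs 2 ++ pvBucket xs 3 = (pvBucket xs 0 ++ pvBucket xs 1) ++ (pvBucket xs 2 ++ pvBucket xs 3) by simp,
           insertBy_split _ _ _ _ (by intro y hy; simp only [List.mem_append] at hy; rcases hy with h|h <;> have := hb _ y h <;> simp [hi, this] <;> omega) (by intro y hy; simp only [List.mem_append] at hy; rcases hy with h|h <;> have := hb _ y h <;> simp [hi, this] <;> omega)]
        simp [hbnew]
      · rw [show pvBucket xs 0 ++ pvBucket xs 1 ++ pvBucket xs 2 ++ pvBucket xs 3 = (pvBucket xs 0 ++ pvBucket xs 1 ++ pvBucket xs 2) ++ pvBucket xs 3 by simp,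
           insertBy_split _ _ _ _ (by intro y hy; simp only [List.mem_append] at hy; rcases hy with (h|h)|h <;> have := hb _ y h <;> simp [hi, this] <;> omega) (by intro y hy; have := hb _ y hy; simp [hi, this])]
        simp [hbnew]
      · rw [show pvBucket xs 0 ++ pvBucket xs 1 ++ pvBucket xs 2 ++ pvBucket xs 3 = (pvBucket xs 0 ++ pvBucket xs 1 ++ pvBucket xs 2 ++ pvBucket xs 3) ++ [] by simp,
           insertBy_split _ _ _ _ (by intro y hy; simp only [List.mem_append] at hy; rcases hy with ((h|h)|h)|h <;> have := hb _ y h <;> simp [hi, this] <;> omega) (by intro y hy; simp at hy)]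
        simp [hbnew]
    exact key (pvRank x) rfl (pvRank_le x)

lemma titles_getD_not_mem (k : String) (dflt : String) (hk : k ∉ pvPlotOrder) :
    pvPlotTitles.getD k dflt = dflt := by
  simp [pvPlotOrder] at hk
  obtain ⟨h0, h1, h2⟩ := hk
  rw [show pvPlotTitles = PySem.Dict.mk
    [("target_dist", "Target distribution"),
     ("feature_importance", "Feature importance"),
     ("corr_heatmap", "Correlation heatmap")] from by decide]
  simp [PySem.Dict.getD_eq_get?_getD, PySem.Dict.get?_mk_cons,
    show ("target_dist" == k) = false from by simp [Ne.symm h0],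
    show ("feature_importance" == k) = false from by simp [Ne.symm h1],
    show ("corr_heatmap" == k) = false from by simp [Ne.symm h2]]
  rfl

lemma filter_fst_eq_nil (l : List (String × String)) (k : String)
    (h : ∀ p ∈ l, p.1 ≠ k) : l.filter (fun p => p.1 == k) = [] := by
  rw [List.filter_eq_nil_iff]; intro p hp; simpa using h p hp

lemma filter_fst_eq_single (l : List (String × String)) (k v : String)
    (hnd : (l.map Prod.fst).Nodup) (hm : (k, v) ∈ l) :
    l.filter (fun p => p.1 == k) = [(k, v)] := by
  induction l with
  | nil => simp at hm
  | cons q l ih =>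
    rw [List.map_cons, List.nodup_cons] at hnd
    rcases List.mem_cons.mp hm with h | h
    · subst h
      rw [List.filter_cons, if_pos (by simp)]
      rw [filter_fst_eq_nil l k (fun r hr hrk =>
        hnd.1 (by simpa using (show k ∈ l.map Prod.fst from hrk ▸ List.mem_map.mpr ⟨r, hr, rfl⟩)))]
    · have hk : k ∈ l.map Prod.fst := List.mem_map.mpr ⟨(k, v), h, rfl⟩
      have hqk : (q.1 == k) = false := by
        simp only [beq_eq_false_iff_ne, ne_eq]
        intro hq; exact hnd.1 (hq ▸ hk)
      rw [List.filter_cons, hqk]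
      simp only [Bool.false_eq_true, if_false]
      exact ih hnd.2 h

lemma foldl_skip {α β : Type} (l : List α) (p : α → Prop) [DecidablePred p] (f : α → β) (acc : List β) :
    l.foldl (fun out x => if p x then out else out ++ [f x]) acc =
      acc ++ (l.filter (fun x => decide ¬ p x)).map f := by
  induction l generalizing acc with
  | nil => simp
  | cons x l ih =>
    by_cases h : p x <;> simp [List.foldl_cons, List.filter_cons, h, ih]

lemma rank0 (a : String × String) : (pvRank a == 0) = (a.1 == "target_dist") := by
  rw [pvRank_cases]; split_ifs <;> simp_all

lemma rank1 (a : String × String) : (pvRank a == 1) = (a.1 == "feature_importance") := by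
  rw [pvRank_cases]; split_ifs <;> simp_all

lemma rank2 (a : String × String) : (pvRank a == 2) = (a.1 == "corr_heatmap") := by
  rw [pvRank_cases]; split_ifs <;> simp_all

lemma rank3 (a : String × String) : (pvRank a == 3) = decide (a.1 ∉ pvPlotOrder) := by
  rw [pvRank_cases]; split_ifs <;> simp_all [pvPlotOrder]

lemma filter_key_eq (d : PySem.Dict String String) (k : String) (hnd : d.keys.Nodup) :
    d.items.filter (fun p => p.1 == k) =
      if d.contains k then [(k, d.getD k "")] else [] := by
  cases hc : d.contains k with
  | false =>
    rw [if_neg (by simp)]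
    refine filter_fst_eq_nil _ _ (fun p hp hpk => ?_)
    have : k ∈ d.keys := hpk ▸ PySem.Dict.mem_keys_of_mem_items d hp
    rw [← PySem.Dict.contains_iff_mem_keys] at this
    simp [hc] at this
  | true =>
    rw [if_pos rfl]
    have hsome : (d.get? k).isSome := by rw [← PySem.Dict.contains_eq_isSome_get?, hc]
    obtain ⟨v, hv⟩ := Option.isSome_iff_exists.mp hsome
    have hgd : d.getD k "" = v := PySem.Dict.getD_of_get?_eq_some d "" hv
    have hmem : (k, v) ∈ d.items := PySem.Dict.mem_items_of_get?_eq_some d hv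
    rw [hgd]
    exact filter_fst_eq_single _ _ _ (by simpa [PySem.Dict.keys] using hnd) hmem

lemma loopA_char (d : PySem.Dict String String) :
    (pvPlotOrder.foldl
      (fun (st : List (List (String × String)) × PySem.Set String) key =>
        if d.contains key then
          (st.1 ++ [[("key", key),
                     ("title", pvPlotTitles.getD key (pvFallbackTitle key)),
                     ("src", d.getD key "")]],
           PySem.Set.add st.2 key)
        else st)
      ([], PySem.Set.empty)) =
      ((pvPlotOrder.filter (fun k => d.contains k)).map
         (fun k => [("key", k),
                    ("title", pvPlotTitles.getD k (pvFallbackTitle k)),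
                    ("src", d.getD k "")]),
       PySem.Set.ofList (pvPlotOrder.filter (fun k => d.contains k))) := by
  cases h0 : d.contains "target_dist" <;> cases h1 : d.contains "feature_importance" <;>
    cases h2 : d.contains "corr_heatmap" <;>
      simp [pvPlotOrder, List.foldl_cons, List.foldl_nil, List.filter_cons, h0, h1, h2,
        PySem.Set.ofList, PySem.Set.add, PySem.Set.empty, PySem.Set.contains]

theorem main_eq (pp : List (String × String)) : ordered_plots pp = ordered_plots_alt pp := by
  show (let d := PySem.Dict.ofList pp
    let st := pvPlotOrder.foldl
      (fun (st : List (List (String × String)) × PySem.Set String) key =>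
        if d.contains key then
          (st.1 ++ [[("key", key),
                     ("title", pvPlotTitles.getD key (pvFallbackTitle key)),
                     ("src", d.getD key "")]],
           PySem.Set.add st.2 key)
        else st)
      ([], PySem.Set.empty)
    d.items.foldl
      (fun out kv =>
        if kv.1 ∈ st.2 then out
        else out ++ [[("key", kv.1),
                      ("title", pvFallbackTitle kv.1),
                      ("src", kv.2)]])
      st.1) =
    (let d := PySem.Dict.ofList pp
     (PySem.List.sorted d.items pvRank false).map
       (fun kv =>
         [("key", kv.1),
          ("title", pvPlotTitles.getD kv.1 (pvFallbackTitle kv.1)),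
          ("src", kv.2)]))
  simp only [loopA_char]
  have hnd : (PySem.Dict.ofList pp).keys.Nodup := PySem.Dict.nodup_keys_ofList pp
  rw [foldl_skip, sorted_rank_buckets]
  have hb0 : (PySem.Dict.ofList pp).items.filter (fun a => pvRank a == 0) =
      if (PySem.Dict.ofList pp).contains "target_dist" then
        [("target_dist", (PySem.Dict.ofList pp).getD "target_dist" "")] else [] := by
    rw [List.filter_congr (fun a _ => rank0 a), filter_key_eq _ _ hnd]
  have hb1 : (PySem.Dict.ofList pp).items.filter (fun a => pvRank a == 1) =
      if (PySem.Dict.ofList pp).contains "feature_importance" then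
        [("feature_importance", (PySem.Dict.ofList pp).getD "feature_importance" "")] else [] := by
    rw [List.filter_congr (fun a _ => rank1 a), filter_key_eq _ _ hnd]
  have hb2 : (PySem.Dict.ofList pp).items.filter (fun a => pvRank a == 2) =
      if (PySem.Dict.ofList pp).contains "corr_heatmap" then
        [("corr_heatmap", (PySem.Dict.ofList pp).getD "corr_heatmap" "")] else [] := by
    rw [List.filter_congr (fun a _ => rank2 a), filter_key_eq _ _ hnd]
  have hb3 : (PySem.Dict.ofList pp).items.filter
        (fun kv => decide ¬(kv.1 ∈ PySem.Set.ofList (pvPlotOrder.filter (fun k => (PySem.Dict.ofList pp).contains k)))) =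
      (PySem.Dict.ofList pp).items.filter (fun a => pvRank a == 3) := by
    apply List.filter_congr
    intro a ha
    have hca : (PySem.Dict.ofList pp).contains a.1 = true :=
      (PySem.Dict.contains_iff_mem_keys _ _).mpr (PySem.Dict.mem_keys_of_mem_items _ ha)
    rw [rank3 a]
    simp [PySem.Set.mem_ofList, List.mem_filter, hca]
  have hmapG : ((PySem.Dict.ofList pp).items.filter (fun a => pvRank a == 3)).map
        (fun kv => [("key", kv.1), ("title", pvFallbackTitle kv.1), ("src", kv.2)]) =
      ((PySem.Dict.ofList pp).items.filter (fun a => pvRank a == 3)).map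
        (fun kv => [("key", kv.1), ("title", pvPlotTitles.getD kv.1 (pvFallbackTitle kv.1)), ("src", kv.2)]) := by
    apply List.map_congr_left
    intro a ha
    have h3 := (List.mem_filter.mp ha).2
    rw [rank3 a] at h3
    rw [titles_getD_not_mem a.1 (pvFallbackTitle a.1) (by simpa using h3)]
  rw [hb3, hmapG, pvBucket, pvBucket, pvBucket, pvBucket, hb0, hb1, hb2, List.map_append, List.map_append, List.map_append]
  congr 1
  cases h0 : (PySem.Dict.ofList pp).contains "target_dist" <;>
    cases h1 : (PySem.Dict.ofList pp).contains "feature_importance" <;>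
      cases h2 : (PySem.Dict.ofList pp).contains "corr_heatmap" <;>
        simp [pvPlotOrder, List.filter_cons, h0, h1, h2]

-- ===== VERDICT (by name: the statement is the Claim_ definition above) =====
theorem ordered_plots_spec : Claim_equal_ordered_plots := by
  intro pp _
  unfold Spec_ordered_plots
  exact main_eq pp
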